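-- pv_equiv track=rewrite | github.com/Alex-Jarosz-1996/mochaFi | trades.py | determine_signal
-- ===== SOURCE A (Python) =====
-- def determine_signal(lst):
--     result = []
--     consecutive = False  # Flag to track if the current True values are consecutive
--
--     for value in lst:
--         if value:
--             if not consecutive:
--                 # The first True, keep it as is
--                 result.append(True)
--                 consecutive = True
--             else:
--                 # Consecutive True values, set to False
--                 result.append(False)
--         else:
--             # False value, keep it as is
--             result.append(False)
--             consecutive = False
--
--     return result
-- ===== SOURCE B (Python) =====
-- def determine_signal(lst):
--     # Rising-edge detector: out[i] is True iff lst[i] is truthy and the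
--     # previous element (falsy for i == 0) is falsy. Stateless pairwise pass.
--     if not lst:
--         return []
--     return [bool(lst[0])] + [bool(cur) and not bool(prev)
--                              for prev, cur in zip(lst, lst[1:])]
-- ===== Notes on version B (the rewrite author's own statement) =====
-- stated objective: idiomatic
-- what changed: Replaced the stateful loop with a 'consecutive' flag by a stateless rising-edge comparison of each element with its predecessor via zip(lst, lst[1:]).
import Mathlib
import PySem

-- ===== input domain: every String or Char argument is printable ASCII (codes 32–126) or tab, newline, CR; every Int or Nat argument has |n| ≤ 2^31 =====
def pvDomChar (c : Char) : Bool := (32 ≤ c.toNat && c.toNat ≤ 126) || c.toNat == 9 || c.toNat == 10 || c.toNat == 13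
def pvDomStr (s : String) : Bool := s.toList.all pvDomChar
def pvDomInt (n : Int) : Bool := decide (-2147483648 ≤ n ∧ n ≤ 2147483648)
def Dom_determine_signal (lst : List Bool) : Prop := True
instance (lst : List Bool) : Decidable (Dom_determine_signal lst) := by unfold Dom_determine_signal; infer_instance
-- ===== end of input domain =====

-- B replaces A's stateful 'consecutive'-flag loop by a stateless pairwise
-- rising-edge comparison of each element with its predecessor (idiomatic).

-- ===== PORT A =====
-- literal transliteration: loop over lst carrying (result, consecutive)
def determine_signal (lst : List Bool) : List Bool :=
  (lst.foldl
    (fun (st : List Bool × Bool) value =>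
      if value then
        if !st.2 then (st.1 ++ [true], true)
        else (st.1 ++ [false], st.2)
      else (st.1 ++ [false], false))
    ([], false)).1

-- ===== PORT B =====
-- transliteration of Source B: head kept, then zip(lst, lst[1:]) pairwise
def determine_signal_alt (lst : List Bool) : List Bool :=
  match lst with
  | [] => []
  | x :: t => x :: (List.zip (x :: t) t).map (fun p => p.2 && !p.1)

-- ===== PRECONDITION & SPEC =====
def Spec_determine_signal (lst : List Bool) (out : List Bool) : Prop := out = determine_signal_alt lst
instance (lst : List Bool) (out : List Bool) : Decidable (Spec_determine_signal lst out) := by unfold Spec_determine_signal; infer_instance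

-- ===== CLAIM (what is proved, stated in full; the proofs are below) =====
def Claim_equal_determine_signal : Prop := ∀ (lst : List Bool), Dom_determine_signal lst → Spec_determine_signal lst (determine_signal lst)

-- ===== LEMMAS AND PROOFS =====

-- abstract recurrence of A's loop: emit (v && !c), next state is v
def dsLoop (c : Bool) : List Bool → List Bool
  | [] => []
  | v :: t => (v && !c) :: dsLoop v t

theorem determine_signal_foldl_eq (l : List Bool) (acc : List Bool) (c : Bool) :
    (l.foldl
      (fun (st : List Bool × Bool) value =>
        if value then
          if !st.2 then (st.1 ++ [true], true)
          else (st.1 ++ [false], st.2)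
        else (st.1 ++ [false], false))
      (acc, c)).1 = acc ++ dsLoop c l := by
  induction l generalizing acc c with
  | nil => simp [dsLoop]
  | cons v t ih =>
    cases v <;> cases c <;>
      simp only [List.foldl_cons, Bool.not_false, Bool.not_true, if_true,
        dsLoop] <;>
      rw [ih] <;> simp

theorem dsLoop_eq_zip (t : List Bool) (v : Bool) :
    dsLoop v t = (List.zip (v :: t) t).map (fun p => p.2 && !p.1) := by
  induction t generalizing v with
  | nil => simp [dsLoop]
  | cons w t' ih => simp [dsLoop, List.zip, ih w]

-- ===== VERDICT (by name: the statement is the Claim_ definition above) =====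
theorem determine_signal_spec : Claim_equal_determine_signal := by
  intro lst _
  unfold Spec_determine_signal determine_signal determine_signal_alt
  rw [determine_signal_foldl_eq]
  cases lst with
  | nil => simp [dsLoop]
  | cons x t => simp [dsLoop, dsLoop_eq_zip]
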